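-- pv_equiv track=rewrite | github.com/Enin/codingTest | Programmers/Stack_Queue/P4_Func_dev.py | solution
-- ===== SOURCE A (Python) =====
-- from collections import deque
--
-- def solution(progresses, speeds):
--     answer = []
--
--     while progresses:
--         q = deque(progresses)
--         cnt = 0
--         while q:
--             check = q.popleft()
--             if check >= 100:
--                 cnt += 1
--             else:
--                 break
--         if cnt > 0:
--             answer.append(cnt)
--             progresses = progresses[cnt:]
--             speeds = speeds[cnt:]
--
--         if not progresses:
--             break
--         else:
--             for i in range(len(progresses)):
--                 progresses[i] = progresses[i] + speeds[i]
--
--     return answer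
-- ===== SOURCE B (Python) =====
-- def solution(progresses, speeds):
--     # compute each task's completion day, then run-length-group by the running max in one pass
--     answer = []
--     cur = -1  # running max completion day so far; -1 = nothing seen yet
--     cnt = 0
--     for j in range(len(progresses)):
--         p = progresses[j]
--         if p >= 100:
--             d = 0
--         else:
--             s = speeds[j]
--             d = (100 - p + s - 1) // s
--         if d <= cur:
--             cnt += 1
--         else:
--             if cnt > 0:
--                 answer.append(cnt)
--             cur = d
--             cnt = 1
--     if cnt > 0:
--         answer.append(cnt)
--     return answer
-- ===== Notes on version B (the rewrite author's own statement) =====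
-- stated objective: faster
-- what changed: A simulates the deployment day by day, re-scanning and incrementing the whole remaining task list each day; B computes each task's completion day with ceiling division and emits group sizes in one pass by run-length-grouping under the running maximum. Intended as faster (O(n) vs O(n*days)); a timing run could not take a clean ratio because A already timed out at n=16 where B returned.
-- outside the precondition, e.g. on solution([150, 50], [-3, 5]): A returns [1, 1], B returns [1, 1]
import Mathlib
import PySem

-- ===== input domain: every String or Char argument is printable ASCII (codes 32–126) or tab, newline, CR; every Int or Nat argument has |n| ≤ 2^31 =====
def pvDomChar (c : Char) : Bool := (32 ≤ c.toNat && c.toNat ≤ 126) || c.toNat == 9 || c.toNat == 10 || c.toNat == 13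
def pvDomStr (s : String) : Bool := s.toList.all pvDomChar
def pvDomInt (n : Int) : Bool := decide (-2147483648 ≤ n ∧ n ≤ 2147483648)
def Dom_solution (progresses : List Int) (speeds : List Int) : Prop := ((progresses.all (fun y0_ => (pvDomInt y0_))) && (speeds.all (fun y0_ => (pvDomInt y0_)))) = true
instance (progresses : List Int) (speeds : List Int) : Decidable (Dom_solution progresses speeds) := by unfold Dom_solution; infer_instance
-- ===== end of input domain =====

-- B replaces A's day-by-day simulation of the whole task list by a single pass that computes each
-- task's completion day and groups consecutive tasks by the running maximum (intended as faster;
-- a timing run measured no ratio: A timed out at n=16 where B returned).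
-- Note: A mutates `progresses` in place (list increments / rebinding); equivalence here is about the return value only.

-- ===== PORT A =====
-- inner `while q: check = q.popleft(); if check >= 100: cnt += 1 else: break`
def popCount : List Int → Nat
  | [] => 0
  | check :: q => if 100 ≤ check then popCount q + 1 else 0

-- fuel-bounded transliteration of A's outer `while progresses:` loop; on inputs satisfying
-- Pre_solution the fuel is proved sufficient below (A may loop forever outside Pre_solution).
-- the increment `progresses[i] = progresses[i] + speeds[i]` is zipWith (+); exact whenever
-- len progresses ≤ len speeds (Python raises IndexError otherwise, excluded by Pre_solution).
def solLoop : Nat → List Int → List Int → List Int → List Int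
  | 0, _, _, answer => answer
  | fuel + 1, progresses, speeds, answer =>
    if progresses = [] then answer
    else
      let cnt := popCount progresses
      let progresses' := if 0 < cnt then progresses.drop cnt else progresses
      let speeds' := if 0 < cnt then speeds.drop cnt else speeds
      let answer' := if 0 < cnt then answer ++ [(cnt : Int)] else answer
      if progresses' = [] then answer'
      else solLoop fuel (List.zipWith (· + ·) progresses' speeds') speeds' answer'

def solution (progresses : List Int) (speeds : List Int) : List Int :=
  solLoop (progresses.length * 2 ^ 32 + 1) progresses speeds []

-- ===== PORT B =====
-- one pass; `speeds[j]` is read only when progresses[j] < 100 (ss.headI is exact when the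
-- element exists; Python raises IndexError otherwise, excluded by Pre_solution).
def altLoop : List Int → List Int → Int → Int → List Int → List Int
  | [], _, _, cnt, answer => if 0 < cnt then answer ++ [cnt] else answer
  | p :: ps, ss, cur, cnt, answer =>
    let d : Int := if 100 ≤ p then 0 else PySem.Int.floordiv (100 - p + ss.headI - 1) ss.headI
    if d ≤ cur then altLoop ps ss.tail cur (cnt + 1) answer
    else altLoop ps ss.tail d 1 (if 0 < cnt then answer ++ [cnt] else answer)

def solution_alt (progresses : List Int) (speeds : List Int) : List Int :=
  altLoop progresses speeds (-1) 0 []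

-- ===== PRECONDITION & SPEC =====
-- Pre_ excludes inputs where A loops forever (an unfinished task whose speed is ≤ 0) or raises
-- IndexError (fewer speeds than tasks while unfinished tasks remain); it also excludes
-- already-finished tasks paired with a negative speed, where whether A terminates depends on
-- whether that task is deployed before the negative speed drags its progress back under 100.
def Pre_solution (progresses : List Int) (speeds : List Int) : Prop :=
  (∀ p ∈ progresses, 100 ≤ p) ∨
  (progresses.length ≤ speeds.length ∧
    ∀ x ∈ progresses.zip speeds, 1 ≤ x.2 ∨ (100 ≤ x.1 ∧ 0 ≤ x.2))
instance (progresses : List Int) (speeds : List Int) : Decidable (Pre_solution progresses speeds) := by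
  unfold Pre_solution; infer_instance

def pvWitness_solution : List Int × List Int := ([30, 30, 95], [30, 5, 10])

def Spec_solution (progresses : List Int) (speeds : List Int) (out : List Int) : Prop := out = solution_alt progresses speeds
instance (progresses : List Int) (speeds : List Int) (out : List Int) : Decidable (Spec_solution progresses speeds out) := by unfold Spec_solution; infer_instance

-- ===== CLAIM (what is proved, stated in full; the proofs are below) =====
def Claim_equal_solution : Prop := ∀ (progresses : List Int) (speeds : List Int), Dom_solution progresses speeds → Pre_solution progresses speeds → Spec_solution progresses speeds (solution progresses speeds)

-- ===== LEMMAS AND PROOFS =====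

-- completion day of a single task (matches the `d` computed by B's loop)
def dayOf (p s : Int) : Int := if 100 ≤ p then 0 else PySem.Int.floordiv (100 - p + s - 1) s

-- completion days of all tasks
def days (ps ss : List Int) : List Int := List.zipWith dayOf ps ss

-- one day of progress on the days list: positive days decrease by one, finished stays finished
def pred0 (d : Int) : Int := if d = 0 then 0 else d - 1

-- number of leading zeros of a days list (= tasks deployed today)
def leadZeros : List Int → Nat
  | [] => 0
  | d :: ds => if d = 0 then leadZeros ds + 1 else 0

-- B's grouping loop, restated on a precomputed days list
def gLoop : List Int → Int → Int → List Int → List Int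
  | [], _, cnt, answer => if 0 < cnt then answer ++ [cnt] else answer
  | d :: ds, cur, cnt, answer =>
    if d ≤ cur then gLoop ds cur (cnt + 1) answer
    else gLoop ds d 1 (if 0 < cnt then answer ++ [cnt] else answer)

def G (ds : List Int) : List Int := gLoop ds (-1) 0 []

-- elementwise invariant: every unfinished task has speed ≥ 1, every finished one speed ≥ 0
def InvP (ps ss : List Int) : Prop := ∀ x ∈ ps.zip ss, 1 ≤ x.2 ∨ (100 ≤ x.1 ∧ 0 ≤ x.2)

theorem g_ans (ds : List Int) (cur cnt : Int) (ans : List Int) :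
    gLoop ds cur cnt ans = ans ++ gLoop ds cur cnt [] := by
  induction ds generalizing cur cnt ans with
  | nil => by_cases h : 0 < cnt <;> simp [gLoop, h]
  | cons d ds ih =>
    by_cases h : d ≤ cur
    · simp only [gLoop, if_pos h]; exact ih ..
    · simp only [gLoop, if_neg h]
      by_cases h2 : 0 < cnt <;> simp only [h2, if_true, if_false]
      · rw [ih d 1 (ans ++ [cnt]), List.nil_append, ih d 1 [cnt]]; simp
      · exact ih d 1 ans

theorem alt_bridge (ps ss : List Int) (cur cnt : Int) (ans : List Int)
    (h : ps.length ≤ ss.length) :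
    altLoop ps ss cur cnt ans = gLoop (days ps ss) cur cnt ans := by
  induction ps generalizing ss cur cnt ans with
  | nil => simp [altLoop, days, gLoop]
  | cons p ps ih =>
    cases ss with
    | nil => simp at h
    | cons s ss =>
      simp only [altLoop, days, List.zipWith, gLoop, List.headI, List.tail, dayOf]
      simp only [List.length_cons, Nat.add_le_add_iff_right] at h
      by_cases hb : (if 100 ≤ p then (0:Int) else PySem.Int.floordiv (100 - p + s - 1) s) ≤ cur <;>
        simp only [hb, if_true, if_false] <;> exact ih _ _ _ _ h

theorem day_pos {p s : Int} (hp : ¬ 100 ≤ p) (hs : 1 ≤ s) : 1 ≤ dayOf p s := by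
  unfold dayOf
  rw [if_neg hp, PySem.Int.le_floordiv_iff_mul_le (by omega)]
  omega

theorem day_nonneg {p s : Int} (h : 1 ≤ s ∨ (100 ≤ p ∧ 0 ≤ s)) : 0 ≤ dayOf p s := by
  unfold dayOf
  by_cases hp : 100 ≤ p
  · simp [hp]
  · rcases h with hs | ⟨h1, _⟩
    · have := day_pos hp hs; unfold dayOf at this; rw [if_neg hp] at this
      rw [if_neg hp]; omega
    · exact absurd h1 hp

theorem day_step {p s : Int} (h : 1 ≤ s ∨ (100 ≤ p ∧ 0 ≤ s)) :
    dayOf (p + s) s = pred0 (dayOf p s) := by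
  unfold dayOf pred0
  by_cases hp : 100 ≤ p
  · have hs0 : 0 ≤ s := by rcases h with h1 | ⟨_, h2⟩ <;> omega
    rw [if_pos hp, if_pos (by omega : (100:Int) ≤ p + s), if_pos rfl]
  · have hs : 1 ≤ s := by
      rcases h with h1 | ⟨h1, _⟩
      · omega
      · exact absurd h1 hp
    rw [if_neg hp]
    have hd1 : 1 ≤ PySem.Int.floordiv (100 - p + s - 1) s := by
      rw [PySem.Int.le_floordiv_iff_mul_le (by omega)]; omega
    by_cases hq : 100 ≤ p + s
    · rw [if_pos hq, if_neg (by omega)]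
      have : PySem.Int.floordiv (100 - p + s - 1) s = 1 := by
        rw [PySem.Int.floordiv_eq_iff_of_pos (by omega)]
        constructor <;> nlinarith
      omega
    · rw [if_neg hq, if_neg (by omega)]
      have h2 := (PySem.Int.floordiv_eq_iff_of_pos (b := s) (a := 100 - p + s - 1)
        (q := PySem.Int.floordiv (100 - p + s - 1) s) (by omega)).mp rfl
      have key : PySem.Int.floordiv (100 - (p + s) + s - 1) s
          = PySem.Int.floordiv (100 - p + s - 1) s - 1 := by
        rw [PySem.Int.floordiv_eq_iff_of_pos (by omega)]
        constructor <;> nlinarith [h2.1, h2.2]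
      rw [key]

theorem day_le {p s : Int} (hs : 1 ≤ s) (hp : ¬ 100 ≤ p) : dayOf p s ≤ 100 - p := by
  unfold dayOf
  rw [if_neg hp]
  have h2 : PySem.Int.floordiv (100 - p + s - 1) s < 100 - p + 1 := by
    rw [PySem.Int.floordiv_lt_iff_lt_mul (by omega)]
    nlinarith
  omega

theorem popCount_days : ∀ (ps ss : List Int), ps.length ≤ ss.length → InvP ps ss →
    popCount ps = leadZeros (days ps ss) := by
  intro ps
  induction ps with
  | nil => intro ss _ _; simp [popCount, days, leadZeros]
  | cons p ps ih =>
    intro ss hlen hinv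
    cases ss with
    | nil => simp at hlen
    | cons s ss =>
      simp only [List.length_cons, Nat.add_le_add_iff_right] at hlen
      have hx : 1 ≤ s ∨ (100 ≤ p ∧ 0 ≤ s) := hinv (p, s) (by simp)
      have htl : InvP ps ss := by
        intro x hmem; exact hinv x (by simp at hmem ⊢; right; exact hmem)
      simp only [popCount, days, List.zipWith, leadZeros]
      by_cases hp : 100 ≤ p
      · rw [if_pos hp, if_pos (by simp [dayOf, hp])]
        rw [ih ss hlen htl]; rfl
      · have hs : 1 ≤ s := by
          rcases hx with h1 | ⟨h1, _⟩
          · omega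
          · exact absurd h1 hp
        have h1 := day_pos hp hs
        have hd0 : ¬ dayOf p s = 0 := by omega
        rw [if_neg hp, if_neg hd0]

theorem days_drop : ∀ (n : Nat) (ps ss : List Int),
    days (ps.drop n) (ss.drop n) = (days ps ss).drop n := by
  intro n
  induction n with
  | zero => simp
  | succ n ih =>
    intro ps ss
    cases ps with
    | nil => simp [days]
    | cons p ps =>
      cases ss with
      | nil => simp [days]
      | cons s ss => simpa [days] using ih ps ss

theorem inv_drop : ∀ (n : Nat) (ps ss : List Int), InvP ps ss →
    InvP (ps.drop n) (ss.drop n) := by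
  intro n
  induction n with
  | zero => simp
  | succ n ih =>
    intro ps ss h
    cases ps with
    | nil => intro x hx; simp at hx
    | cons p ps =>
      cases ss with
      | nil => intro x hx; simp at hx
      | cons s ss =>
        simp only [List.drop_succ_cons]
        exact ih ps ss (fun x hx => h x (by simp at hx ⊢; right; exact hx))

theorem days_incr : ∀ (ps ss : List Int), InvP ps ss →
    days (List.zipWith (· + ·) ps ss) ss = (days ps ss).map pred0 := by
  intro ps
  induction ps with
  | nil => intro ss _; simp [days]
  | cons p ps ih =>
    intro ss hinv
    cases ss with
    | nil => simp [days]
    | cons s ss =>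
      have hx : 1 ≤ s ∨ (100 ≤ p ∧ 0 ≤ s) := hinv (p, s) (by simp)
      have htl : InvP ps ss := by
        intro x hmem; exact hinv x (by simp at hmem ⊢; right; exact hmem)
      simp only [days, List.zipWith, List.map, List.cons.injEq]
      exact ⟨day_step hx, by simpa [days] using ih ss htl⟩

theorem inv_incr : ∀ (ps ss : List Int), InvP ps ss →
    InvP (List.zipWith (· + ·) ps ss) ss := by
  intro ps
  induction ps with
  | nil => intro ss _ x hx; simp at hx
  | cons p ps ih =>
    intro ss hinv
    cases ss with
    | nil => intro x hx; simp at hx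
    | cons s ss =>
      have hx : 1 ≤ s ∨ (100 ≤ p ∧ 0 ≤ s) := hinv (p, s) (by simp)
      have htl : InvP ps ss := by
        intro x hmem; exact hinv x (by simp at hmem ⊢; right; exact hmem)
      intro x hmem
      simp only [List.zipWith, List.zip_cons_cons, List.mem_cons] at hmem
      rcases hmem with rfl | hmem
      · rcases hx with h1 | ⟨h1, h2⟩
        · exact Or.inl h1
        · exact Or.inr ⟨by omega, h2⟩
      · exact ih ss htl x hmem

theorem days_nonneg : ∀ (ps ss : List Int), InvP ps ss → ∀ d ∈ days ps ss, 0 ≤ d := by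
  intro ps
  induction ps with
  | nil => intro ss _ d hd; simp [days] at hd
  | cons p ps ih =>
    intro ss hinv d hd
    cases ss with
    | nil => simp [days] at hd
    | cons s ss =>
      have hx : 1 ≤ s ∨ (100 ≤ p ∧ 0 ≤ s) := hinv (p, s) (by simp)
      have htl : InvP ps ss := by
        intro x hmem; exact hinv x (by simp at hmem ⊢; right; exact hmem)
      simp only [days, List.zipWith, List.mem_cons] at hd
      rcases hd with rfl | hd
      · exact day_nonneg hx
      · exact ih ss htl d (by simpa [days] using hd)

theorem lz_spec : ∀ (ds : List Int),
    ds = List.replicate (leadZeros ds) 0 ++ ds.drop (leadZeros ds) := by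
  intro ds
  induction ds with
  | nil => simp [leadZeros]
  | cons d ds ih =>
    by_cases h : d = 0
    · subst h
      have hz : leadZeros ((0:Int) :: ds) = leadZeros ds + 1 := by simp [leadZeros]
      rw [hz, List.replicate_succ, List.drop_succ_cons, List.cons_append]
      exact congrArg (List.cons 0) ih
    · simp [leadZeros, h]

theorem lz_head : ∀ (ds : List Int) (d : Int) (rest : List Int),
    ds.drop (leadZeros ds) = d :: rest → d ≠ 0 := by
  intro ds
  induction ds with
  | nil => intro d rest h; simp [leadZeros] at h
  | cons x xs ih =>
    intro d rest h
    by_cases hx : x = 0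
    · subst hx; simp only [leadZeros] at h; exact ih d rest h
    · simp only [leadZeros, if_neg hx, List.drop_zero] at h
      cases h; exact hx

theorem gzeros : ∀ (k : Nat) (rest : List Int) (cnt : Int) (ans : List Int), 0 < cnt →
    gLoop (List.replicate k 0 ++ rest) 0 cnt ans = gLoop rest 0 (cnt + k) ans := by
  intro k
  induction k with
  | zero => intro rest cnt ans _; simp
  | succ k ih =>
    intro rest cnt ans hcnt
    rw [List.replicate_succ, List.cons_append]
    simp only [gLoop, if_pos (le_refl (0:Int))]
    rw [ih rest (cnt + 1) ans (by omega)]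
    congr 1
    push_cast
    ring

theorem G_split (ds : List Int) (h0 : ∀ d ∈ ds, 0 ≤ d) (hn : 0 < leadZeros ds) :
    G ds = (leadZeros ds : Int) :: G (ds.drop (leadZeros ds)) := by
  obtain ⟨x, xs, hx⟩ : ∃ x xs, ds = x :: xs := by
    cases ds with
    | nil => simp [leadZeros] at hn
    | cons x xs => exact ⟨x, xs, rfl⟩
  subst hx
  have hx0 : x = 0 := by
    by_contra hne; simp [leadZeros, hne] at hn
  subst hx0
  have hlz : leadZeros ((0:Int) :: xs) = leadZeros xs + 1 := by simp [leadZeros]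
  have hxs := lz_spec xs
  unfold G
  rw [hlz]
  simp only [gLoop, if_neg (by omega : ¬ (0:Int) ≤ -1), if_neg (by omega : ¬ (0:Int) < 0),
    List.drop_succ_cons]
  conv_lhs => rw [hxs]
  rw [gzeros (leadZeros xs) _ 1 [] (by omega)]
  cases hrest : xs.drop (leadZeros xs) with
  | nil =>
    simp only [gLoop]
    rw [if_pos (by omega : (0:Int) < 1 + (leadZeros xs : Int))]
    simp only [List.nil_append]
    push_cast
    ring_nf
  | cons r t =>
    have hr0 : r ≠ 0 := lz_head xs r t hrest
    have hrpos : 0 ≤ r := by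
      apply h0; right
      have : r ∈ xs.drop (leadZeros xs) := by rw [hrest]; simp
      exact List.mem_of_mem_drop this
    simp only [gLoop, lt_self_iff_false, if_false]
    rw [if_neg (by omega : ¬ r ≤ (0:Int)), if_neg (by omega : ¬ r ≤ (-1:Int)),
      if_pos (by omega : (0:Int) < 1 + (leadZeros xs : Int))]
    rw [g_ans t r 1 ([] ++ [1 + (leadZeros xs : Int)])]
    simp only [List.nil_append, List.singleton_append, List.cons.injEq]
    refine ⟨by push_cast; ring, trivial⟩

theorem gpred : ∀ (rest : List Int) (cur cnt : Int) (ans : List Int), 1 ≤ cur →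
    (∀ d ∈ rest, 0 ≤ d) →
    gLoop (rest.map pred0) (cur - 1) cnt ans = gLoop rest cur cnt ans := by
  intro rest
  induction rest with
  | nil => intro cur cnt ans _ _; simp [gLoop]
  | cons x xs ih =>
    intro cur cnt ans hcur h0
    have hx0 : 0 ≤ x := h0 x (by simp)
    have htl : ∀ d ∈ xs, 0 ≤ d := fun d hd => h0 d (by simp [hd])
    simp only [List.map, gLoop]
    by_cases hle : x ≤ cur
    · rw [if_pos (by unfold pred0; split_ifs <;> omega), if_pos hle]
      exact ih cur (cnt + 1) ans hcur htl
    · rw [if_neg (by unfold pred0; split_ifs <;> omega), if_neg hle]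
      have hx2 : pred0 x = x - 1 := by unfold pred0; rw [if_neg (by omega)]
      rw [hx2]
      have := ih x 1 (if 0 < cnt then ans ++ [cnt] else ans) (by omega) htl
      calc gLoop (xs.map pred0) (x - 1) 1 (if 0 < cnt then ans ++ [cnt] else ans)
          = gLoop xs x 1 (if 0 < cnt then ans ++ [cnt] else ans) := this

theorem G_pred (d : Int) (rest : List Int) (hd : 1 ≤ d) (h0 : ∀ x ∈ rest, 0 ≤ x) :
    G ((d :: rest).map pred0) = G (d :: rest) := by
  unfold G
  have hp : pred0 d = d - 1 := by unfold pred0; rw [if_neg (by omega)]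
  simp only [List.map, gLoop, hp, lt_self_iff_false, if_false]
  rw [if_neg (by omega : ¬ (d:Int) - 1 ≤ -1), if_neg (by omega : ¬ d ≤ (-1:Int))]
  exact gpred rest d 1 [] hd h0

theorem sum_drop_le (n : Nat) (ds : List Int) (h0 : ∀ d ∈ ds, 0 ≤ d) :
    (ds.drop n).sum ≤ ds.sum := by
  have h1 : ds.sum = (ds.take n).sum + (ds.drop n).sum := by
    rw [← List.sum_append, List.take_append_drop]
  have h2 : 0 ≤ (ds.take n).sum :=
    List.sum_nonneg (fun x hx => h0 x (List.mem_of_mem_take hx))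
  omega

theorem sum_pred_lt (d : Int) (rest : List Int) (hd : 1 ≤ d) (h0 : ∀ x ∈ rest, 0 ≤ x) :
    ((d :: rest).map pred0).sum ≤ (d :: rest).sum - 1 := by
  have h1 : ∀ (l : List Int), (∀ x ∈ l, 0 ≤ x) → (l.map pred0).sum ≤ l.sum := by
    intro l hl
    induction l with
    | nil => simp
    | cons y ys ihy =>
      simp only [List.map, List.sum_cons]
      have hy := hl y (by simp)
      have h2 := ihy (fun x hx => hl x (by simp [hx]))
      have hpy : pred0 y ≤ y := by unfold pred0; split_ifs <;> omega
      omega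
  have h3 := h1 rest h0
  have hp : pred0 d = d - 1 := by unfold pred0; rw [if_neg (by omega)]
  simp only [List.map, List.sum_cons, hp]
  omega

theorem sum_nonneg' (ds : List Int) (h0 : ∀ d ∈ ds, 0 ≤ d) : 0 ≤ ds.sum := by
  exact List.sum_nonneg h0

theorem sum_le_bound : ∀ (l : List Int) (C : Int), 0 ≤ C → (∀ x ∈ l, x ≤ C) →
    l.sum ≤ (l.length : Int) * C := by
  intro l C hC
  induction l with
  | nil => intro _; simp
  | cons x xs ih =>
    intro h
    have h1 := h x (by simp)
    have h2 := ih (fun y hy => h y (by simp [hy]))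
    simp only [List.sum_cons, List.length_cons]
    push_cast
    nlinarith

theorem days_bound : ∀ (ps ss : List Int), (∀ p ∈ ps, -2147483648 ≤ p) → InvP ps ss →
    ∀ d ∈ days ps ss, d ≤ 2 ^ 32 := by
  intro ps
  induction ps with
  | nil => intro ss _ _ d hd; simp [days] at hd
  | cons p ps ih =>
    intro ss hb hinv d hd
    cases ss with
    | nil => simp [days] at hd
    | cons s ss =>
      have hx : 1 ≤ s ∨ (100 ≤ p ∧ 0 ≤ s) := hinv (p, s) (by simp)
      have htl : InvP ps ss := by
        intro x hmem; exact hinv x (by simp at hmem ⊢; right; exact hmem)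
      simp only [days, List.zipWith, List.mem_cons] at hd
      rcases hd with rfl | hd
      · by_cases hp : 100 ≤ p
        · simp [dayOf, hp]
        · have hs : 1 ≤ s := by
            rcases hx with h1 | ⟨h1, _⟩
            · omega
            · exact absurd h1 hp
          have := day_le hs hp
          have hpb := hb p (by simp)
          omega
      · exact ih ss (fun q hq => hb q (by simp [hq])) htl d (by simpa [days] using hd)

theorem solLoop_step (fuel : Nat) (ps ss ans : List Int) (hps : ps ≠ []) :
    solLoop (fuel + 1) ps ss ans =
      (if (if 0 < popCount ps then ps.drop (popCount ps) else ps) = [] then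
         (if 0 < popCount ps then ans ++ [(popCount ps : Int)] else ans)
       else solLoop fuel
         (List.zipWith (· + ·) (if 0 < popCount ps then ps.drop (popCount ps) else ps)
           (if 0 < popCount ps then ss.drop (popCount ps) else ss))
         (if 0 < popCount ps then ss.drop (popCount ps) else ss)
         (if 0 < popCount ps then ans ++ [(popCount ps : Int)] else ans)) := by
  simp only [solLoop, if_neg hps]

theorem main_loop : ∀ (fuel : Nat) (ps ss ans : List Int),
    ps.length ≤ ss.length → InvP ps ss → (days ps ss).sum.toNat + 1 ≤ fuel →
    solLoop fuel ps ss ans = ans ++ G (days ps ss) := by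
  intro fuel
  induction fuel with
  | zero => intro ps ss ans _ _ hf; omega
  | succ fuel ih =>
    intro ps ss ans hlen hinv hf
    by_cases hps : ps = []
    · subst hps; simp [solLoop, days, G, gLoop]
    · have hnn : ∀ d ∈ days ps ss, 0 ≤ d := days_nonneg ps ss hinv
      have hpc : popCount ps = leadZeros (days ps ss) := popCount_days ps ss hlen hinv
      have hlend : (days ps ss).length = ps.length := by
        simp only [days, List.length_zipWith]; omega
      simp only [solLoop, if_neg hps]
      by_cases hcnt : 0 < popCount ps
      · simp only [if_pos hcnt]
        have hlz : 0 < leadZeros (days ps ss) := hpc ▸ hcnt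
        have hGs := G_split (days ps ss) hnn hlz
        have hdd : days (ps.drop (popCount ps)) (ss.drop (popCount ps))
            = (days ps ss).drop (leadZeros (days ps ss)) := by rw [days_drop, hpc]
        have hlend2 : ((days ps ss).drop (leadZeros (days ps ss))).length
            = (ps.drop (popCount ps)).length := by
          simp only [List.length_drop, hlend, hpc]
        by_cases hps2 : ps.drop (popCount ps) = []
        · rw [if_pos hps2]
          have hdnil : (days ps ss).drop (leadZeros (days ps ss)) = [] := by
            apply List.eq_nil_of_length_eq_zero
            rw [hlend2, hps2]; rfl
          rw [hGs, hdnil, hpc]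
          simp [G, gLoop]
        · rw [if_neg hps2]
          have hinv' : InvP (ps.drop (popCount ps)) (ss.drop (popCount ps)) :=
            inv_drop _ ps ss hinv
          have hnn' : ∀ d ∈ (days ps ss).drop (leadZeros (days ps ss)), 0 ≤ d :=
            fun d hd => hnn d (List.mem_of_mem_drop hd)
          obtain ⟨r, t, hrt⟩ := List.exists_cons_of_ne_nil (show
              (days ps ss).drop (leadZeros (days ps ss)) ≠ [] by
            intro hnil
            apply hps2
            apply List.eq_nil_of_length_eq_zero
            rw [← hlend2, hnil]; rfl)
          have hr1 : 1 ≤ r := by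
            have h01 : 0 ≤ r := hnn' r (by rw [hrt]; simp)
            have hne := lz_head (days ps ss) r t hrt
            omega
          have hnt : ∀ x ∈ t, 0 ≤ x := fun x hx => hnn' x (by rw [hrt]; simp [hx])
          have hdincr : days (List.zipWith (· + ·) (ps.drop (popCount ps)) (ss.drop (popCount ps)))
              (ss.drop (popCount ps))
              = ((days ps ss).drop (leadZeros (days ps ss))).map pred0 := by
            rw [days_incr _ _ hinv', hdd]
          have hfuel : ((((days ps ss).drop (leadZeros (days ps ss))).map pred0).sum).toNat + 1
              ≤ fuel := by
            have h1 := sum_pred_lt r t hr1 hnt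
            rw [← hrt] at h1
            have h2 := sum_drop_le (leadZeros (days ps ss)) (days ps ss) hnn
            have h4 : 0 ≤ ((((days ps ss).drop (leadZeros (days ps ss))).map pred0).sum) := by
              apply sum_nonneg'
              intro x hx
              simp only [List.mem_map] at hx
              obtain ⟨y, hy, rfl⟩ := hx
              have := hnn' y hy
              unfold pred0; split_ifs <;> omega
            omega
          rw [ih _ _ _ (by simp only [List.length_zipWith, List.length_drop]; omega)
            (inv_incr _ _ hinv') (by rw [hdincr]; exact hfuel)]
          rw [hdincr, hrt, G_pred r t hr1 hnt, ← hrt, hGs, hpc]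
          simp
      · simp only [if_neg hcnt, if_neg hps]
        have hlz0 : leadZeros (days ps ss) = 0 := by omega
        obtain ⟨r, t, hrt⟩ := List.exists_cons_of_ne_nil (show days ps ss ≠ [] by
          intro hnil
          apply hps
          apply List.eq_nil_of_length_eq_zero
          rw [← hlend, hnil]; rfl)
        have hr1 : 1 ≤ r := by
          have h01 : 0 ≤ r := hnn r (by rw [hrt]; simp)
          have hne := lz_head (days ps ss) r t (by rw [hlz0, List.drop_zero]; exact hrt)
          omega
        have hnt : ∀ x ∈ t, 0 ≤ x := fun x hx => hnn x (by rw [hrt]; simp [hx])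
        have hdincr : days (List.zipWith (· + ·) ps ss) ss = (days ps ss).map pred0 :=
          days_incr ps ss hinv
        have hfuel : (((days ps ss).map pred0).sum).toNat + 1 ≤ fuel := by
          have h1 := sum_pred_lt r t hr1 hnt
          rw [← hrt] at h1
          have h4 : 0 ≤ (((days ps ss).map pred0).sum) := by
            apply sum_nonneg'
            intro x hx
            simp only [List.mem_map] at hx
            obtain ⟨y, hy, rfl⟩ := hx
            have := hnn y hy
            unfold pred0; split_ifs <;> omega
          omega
        rw [ih _ _ _ (by simp only [List.length_zipWith]; omega)
          (inv_incr _ _ hinv) (by rw [hdincr]; exact hfuel)]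
        rw [hdincr, hrt, G_pred r t hr1 hnt, ← hrt]

theorem popCount_all : ∀ (ps : List Int), (∀ p ∈ ps, 100 ≤ p) → popCount ps = ps.length := by
  intro ps
  induction ps with
  | nil => intro _; rfl
  | cons p ps ih =>
    intro h
    simp only [popCount, if_pos (h p (by simp)), List.length_cons]
    rw [ih (fun q hq => h q (by simp [hq]))]

theorem alt_all : ∀ (ps ss : List Int) (cnt : Int) (ans : List Int), (∀ p ∈ ps, 100 ≤ p) → 0 < cnt →
    altLoop ps ss 0 cnt ans = ans ++ [cnt + ps.length] := by
  intro ps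
  induction ps with
  | nil => intro ss cnt ans _ hcnt; simp [altLoop, if_pos hcnt]
  | cons p ps ih =>
    intro ss cnt ans h hcnt
    have hp : 100 ≤ p := h p (by simp)
    simp only [altLoop, if_pos hp, if_pos (le_refl (0:Int))]
    rw [ih ss.tail (cnt + 1) ans (fun q hq => h q (by simp [hq])) (by omega)]
    have key : ∀ X Y : Int, X = Y → ans ++ [X] = ans ++ [Y] := fun X Y h' => by rw [h']
    apply key
    simp only [List.length_cons]
    push_cast
    ring

-- ===== VERDICT (by name: the statement is the Claim_ definition above) =====
theorem solution_spec : Claim_equal_solution := by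
  unfold Claim_equal_solution
  intro ps ss hdom hpre
  unfold Spec_solution
  rcases hpre with hall | ⟨hlen, hinv⟩
  · -- every task already at 100: one outer iteration deploys everything
    cases ps with
    | nil =>
      show solLoop (([] : List Int).length * 2 ^ 32 + 1) [] ss [] = altLoop [] ss (-1) 0 []
      rw [show ([] : List Int).length * 2 ^ 32 + 1 = 0 + 1 by simp]
      simp [solLoop, altLoop]
    | cons p ps' =>
      unfold solution solution_alt
      have hpc := popCount_all (p :: ps') hall
      have hp : 100 ≤ p := hall p (by simp)
      have hlt : 0 < (p :: ps').length := by simp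
      rw [solLoop_step _ _ _ _ (List.cons_ne_nil p ps'), hpc]
      simp only [if_pos hlt]
      rw [if_pos (by simp : List.drop (p :: ps').length (p :: ps') = ([] : List Int))]
      simp only [altLoop, if_pos hp, if_neg (by omega : ¬ (0:Int) ≤ -1),
        if_neg (by omega : ¬ (0:Int) < 0)]
      rw [alt_all ps' ss.tail 1 [] (fun q hq => hall q (by simp [hq])) (by omega)]
      have key : ∀ X Y : Int, X = Y → ([] : List Int) ++ [X] = [] ++ [Y] :=
        fun X Y h' => by rw [h']
      apply key
      simp only [List.length_cons]
      push_cast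
      ring
  · unfold solution solution_alt
    rw [alt_bridge ps ss (-1) 0 [] hlen]
    have hnn := days_nonneg ps ss hinv
    have hdomp : ∀ p ∈ ps, -2147483648 ≤ p := by
      simp only [Dom_solution, Bool.and_eq_true, List.all_eq_true, pvDomInt,
        decide_eq_true_eq] at hdom
      intro p hp
      exact (hdom.1 p hp).1
    have hub := days_bound ps ss hdomp hinv
    have hlend : (days ps ss).length = ps.length := by
      simp only [days, List.length_zipWith]; omega
    have hsum : (days ps ss).sum ≤ (ps.length : Int) * 2 ^ 32 := by
      have := sum_le_bound (days ps ss) (2 ^ 32) (by norm_num) hub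
      rw [hlend] at this
      exact this
    have hfuel : ((days ps ss).sum).toNat + 1 ≤ ps.length * 2 ^ 32 + 1 := by
      have h0 := sum_nonneg' (days ps ss) hnn
      have hcast : ((ps.length * 2 ^ 32 : Nat) : Int) = (ps.length : Int) * 2 ^ 32 := by
        push_cast; ring
      omega
    rw [main_loop _ ps ss [] hlen hinv hfuel]
    simp [G]
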